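-- pv_equiv track=rewrite | github.com/masdevas/athena | src/backend/llvm/runtime/tablegen.py | generate_wrapper
-- ===== SOURCE A (Python) =====
-- plainArgTypes = ["int", "int*", "int *", "float", "float *", "float*", "double", "double *",
--                  "double*"]
--
-- def get_mangled_name(name, typename):
--     return "athn_" + name + "_" + typename[0]
--
-- def generate_wrapper(name, signature, gentypes):
--     defs = ""
--     for template in gentypes:
--         defs += "void "
--         defs += get_mangled_name(name, template)
--         defs += "("
--
--         defs += "void *devicePtr, "
--         defs += "void *allocatorPtr"
--
--         arg_no = 0
--         for arg in signature:
--             defs += ","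
--
--             arg_resolved = arg
--
--             if arg == "gentype":
--                 arg_resolved = template
--             elif arg == "gentype *":
--                 arg_resolved = template + " *"
--             else:
--                 arg_resolved = arg_resolved.replace("<gentype>", "<" + template + ">")
--
--             if arg_resolved not in plainArgTypes:
--                 defs += " void *arg" + str(arg_no) + "Ptr"
--             else:
--                 defs += " " + arg_resolved + " arg" + str(arg_no)
--             arg_no += 1
--
--         defs += ") {\n"
--
--         defs += "auto device = reinterpret_cast<Device*>(devicePtr);\n"
--         defs += "auto allocator = reinterpret_cast<Allocator*>(allocatorPtr);\n"
--
--         arg_no = 0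
--         for arg in signature:
--             arg_resolved = arg
--             if arg == "gentype":
--                 arg_resolved = template
--             elif arg == "gentype *":
--                 arg_resolved = template + " *"
--             else:
--                 arg_resolved = arg_resolved.replace("<gentype>", "<" + template + ">")
--             if arg_resolved not in plainArgTypes:
--                 defs += "auto arg" + str(
--                     arg_no) + " = reinterpret_cast<" + arg_resolved + ">(arg" + str(
--                     arg_no) + "Ptr);\n"
--             arg_no += 1
--         defs += name + "<" + template + ">(device, allocator"
--
--         arg_no = 0
--         for arg in signature:
--             defs += ", "
--             if arg not in plainArgTypes:
--                 defs += "arg" + str(arg_no)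
--             else:
--                 defs += "" + arg + " arg" + str(arg_no)
--             arg_no += 1
--         defs += ");\n"
--         defs += "}\n"
--     return defs
-- ===== SOURCE B (Python) =====
-- plainArgTypes = ["int", "int*", "int *", "float", "float *", "float*", "double", "double *",
--                  "double*"]
--
-- def _resolve(arg, template):
--     if arg == "gentype":
--         return template
--     if arg == "gentype *":
--         return template + " *"
--     return arg.replace("<gentype>", "<" + template + ">")
--
-- def generate_wrapper(name, signature, gentypes):
--     chunks = []
--     for template in gentypes:
--         params, casts, call_args = [], [], []
--         i = 0
--         for arg in signature:
--             r = _resolve(arg, template)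
--             if r not in plainArgTypes:
--                 params.append(", void *arg" + str(i) + "Ptr")
--                 casts.append("auto arg" + str(i) + " = reinterpret_cast<" + r + ">(arg" + str(i) + "Ptr);\n")
--             else:
--                 params.append(", " + r + " arg" + str(i))
--             if arg not in plainArgTypes:
--                 call_args.append(", arg" + str(i))
--             else:
--                 call_args.append(", " + arg + " arg" + str(i))
--             i += 1
--         chunks.append(
--             "void athn_" + name + "_" + template[0]
--             + "(void *devicePtr, void *allocatorPtr" + "".join(params) + ") {\n"
--             + "auto device = reinterpret_cast<Device*>(devicePtr);\n"
--             + "auto allocator = reinterpret_cast<Allocator*>(allocatorPtr);\n"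
--             + "".join(casts)
--             + name + "<" + template + ">(device, allocator" + "".join(call_args) + ");\n"
--             + "}\n")
--     return "".join(chunks)
-- ===== Notes on version B (the rewrite author's own statement) =====
-- stated objective: alternative
-- what changed: Type resolution is factored into a helper and the three repeated scans of signature are fused into one pass that collects params/casts/call-args fragments into lists, joined and spliced into the boilerplate per template.
import Mathlib
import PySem

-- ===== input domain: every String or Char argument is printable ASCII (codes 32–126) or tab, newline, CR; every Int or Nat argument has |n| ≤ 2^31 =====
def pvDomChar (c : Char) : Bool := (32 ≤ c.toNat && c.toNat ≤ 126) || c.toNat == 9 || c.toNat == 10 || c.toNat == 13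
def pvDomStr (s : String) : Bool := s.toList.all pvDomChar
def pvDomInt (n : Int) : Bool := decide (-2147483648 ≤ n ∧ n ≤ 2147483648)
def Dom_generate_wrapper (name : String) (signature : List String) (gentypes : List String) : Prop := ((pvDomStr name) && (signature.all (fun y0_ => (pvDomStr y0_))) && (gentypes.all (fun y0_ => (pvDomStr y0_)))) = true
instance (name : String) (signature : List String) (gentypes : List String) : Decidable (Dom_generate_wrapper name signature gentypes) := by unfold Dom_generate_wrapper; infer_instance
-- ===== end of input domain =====

-- B fuses A's three scans of `signature` into a single pass collecting three fragment
-- lists, with type resolution factored into a helper (same cost; different decomposition).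

-- ===== PORT A =====
def plainArgTypes : List String :=
  ["int", "int*", "int *", "float", "float *", "float*", "double", "double *", "double*"]

-- typename[0]: Python raises IndexError on an empty typename; Pre_ excludes that, the
-- `""` fallback is never reached under Pre_.
def get_mangled_name (name typename : String) : String :=
  "athn_" ++ name ++ "_" ++ (match PySem.Str.pyGet? typename 0 with
    | some c => String.ofList [c]
    | none => "")

def generate_wrapper (name : String) (signature : List String) (gentypes : List String) : String :=
  gentypes.foldl (fun defs template =>
    let defs := defs ++ "void " ++ get_mangled_name name template ++ "("
      ++ "void *devicePtr, " ++ "void *allocatorPtr"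
    let st := signature.foldl (fun (st : String × Nat) arg =>
        let defs := st.1 ++ ","
        let arg_resolved := arg
        let arg_resolved :=
          if arg == "gentype" then template
          else if arg == "gentype *" then template ++ " *"
          else PySem.Str.replace arg_resolved "<gentype>" ("<" ++ template ++ ">")
        let defs :=
          if ¬ (plainArgTypes.contains arg_resolved) then
            defs ++ " void *arg" ++ Nat.repr st.2 ++ "Ptr"
          else
            defs ++ " " ++ arg_resolved ++ " arg" ++ Nat.repr st.2
        (defs, st.2 + 1)) (defs, 0)
    let defs := st.1 ++ ") {\n"
      ++ "auto device = reinterpret_cast<Device*>(devicePtr);\n"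
      ++ "auto allocator = reinterpret_cast<Allocator*>(allocatorPtr);\n"
    let st := signature.foldl (fun (st : String × Nat) arg =>
        let arg_resolved := arg
        let arg_resolved :=
          if arg == "gentype" then template
          else if arg == "gentype *" then template ++ " *"
          else PySem.Str.replace arg_resolved "<gentype>" ("<" ++ template ++ ">")
        let defs :=
          if ¬ (plainArgTypes.contains arg_resolved) then
            st.1 ++ "auto arg" ++ Nat.repr st.2 ++ " = reinterpret_cast<" ++ arg_resolved
              ++ ">(arg" ++ Nat.repr st.2 ++ "Ptr);\n"
          else st.1
        (defs, st.2 + 1)) (defs, 0)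
    let defs := st.1 ++ name ++ "<" ++ template ++ ">(device, allocator"
    let st := signature.foldl (fun (st : String × Nat) arg =>
        let defs := st.1 ++ ", "
        let defs :=
          if ¬ (plainArgTypes.contains arg) then defs ++ "arg" ++ Nat.repr st.2
          else defs ++ "" ++ arg ++ " arg" ++ Nat.repr st.2
        (defs, st.2 + 1)) (defs, 0)
    st.1 ++ ");\n" ++ "}\n") ""

-- ===== PORT B =====
def resolveType (arg template : String) : String :=
  if arg == "gentype" then template
  else if arg == "gentype *" then template ++ " *"
  else PySem.Str.replace arg "<gentype>" ("<" ++ template ++ ">")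

-- "".join(parts)
def joinAll (parts : List String) : String := parts.foldl (· ++ ·) ""

def generate_wrapper_alt (name : String) (signature : List String) (gentypes : List String) : String :=
  joinAll (gentypes.map (fun template =>
    let acc := signature.foldl
      (fun (acc : List String × List String × List String × Nat) arg =>
        let (params, casts, call_args, i) := acc
        let r := resolveType arg template
        let params :=
          if ¬ (plainArgTypes.contains r) then params ++ [", void *arg" ++ Nat.repr i ++ "Ptr"]
          else params ++ [", " ++ r ++ " arg" ++ Nat.repr i]
        let casts :=
          if ¬ (plainArgTypes.contains r) then
            casts ++ ["auto arg" ++ Nat.repr i ++ " = reinterpret_cast<" ++ r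
              ++ ">(arg" ++ Nat.repr i ++ "Ptr);\n"]
          else casts
        let call_args :=
          if ¬ (plainArgTypes.contains arg) then call_args ++ [", arg" ++ Nat.repr i]
          else call_args ++ [", " ++ arg ++ " arg" ++ Nat.repr i]
        (params, casts, call_args, i + 1)) ([], [], [], 0)
    "void athn_" ++ name ++ "_"
      ++ (match PySem.Str.pyGet? template 0 with | some c => String.ofList [c] | none => "")
      ++ "(void *devicePtr, void *allocatorPtr" ++ joinAll acc.1 ++ ") {\n"
      ++ "auto device = reinterpret_cast<Device*>(devicePtr);\n"
      ++ "auto allocator = reinterpret_cast<Allocator*>(allocatorPtr);\n"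
      ++ joinAll acc.2.1
      ++ name ++ "<" ++ template ++ ">(device, allocator" ++ joinAll acc.2.2.1 ++ ");\n"
      ++ "}\n"))

-- ===== PRECONDITION & SPEC =====
-- Pre_ excludes only inputs on which A raises: an empty string among gentypes makes
-- `template[0]` raise IndexError (B raises there too).
def Pre_generate_wrapper (name : String) (signature : List String) (gentypes : List String) : Prop :=
  "" ∉ gentypes
instance (name : String) (signature : List String) (gentypes : List String) : Decidable (Pre_generate_wrapper name signature gentypes) := by unfold Pre_generate_wrapper; infer_instance

def pvWitness_generate_wrapper : String × List String × List String :=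
  ("add", ["gentype", "int", "Tensor<gentype> *"], ["float", "double"])

def Spec_generate_wrapper (name : String) (signature : List String) (gentypes : List String) (out : String) : Prop := out = generate_wrapper_alt name signature gentypes
instance (name : String) (signature : List String) (gentypes : List String) (out : String) : Decidable (Spec_generate_wrapper name signature gentypes out) := by unfold Spec_generate_wrapper; infer_instance

-- ===== CLAIM (what is proved, stated in full; the proofs are below) =====
def Claim_equal_generate_wrapper : Prop := ∀ (name : String) (signature : List String) (gentypes : List String), Dom_generate_wrapper name signature gentypes → Pre_generate_wrapper name signature gentypes → Spec_generate_wrapper name signature gentypes (generate_wrapper name signature gentypes)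

-- ===== LEMMAS AND PROOFS =====
def pieceP (t : String) (n : Nat) (arg : String) : String :=
  let r := resolveType arg t
  if ¬ (plainArgTypes.contains r) then ", void *arg" ++ Nat.repr n ++ "Ptr"
  else ", " ++ r ++ " arg" ++ Nat.repr n

def listP (t : String) : List String → Nat → List String
  | [], _ => []
  | a :: tl, n => pieceP t n a :: listP t tl (n + 1)

def listC (t : String) : List String → Nat → List String
  | [], _ => []
  | a :: tl, n =>
    (if ¬ (plainArgTypes.contains (resolveType a t)) then
      ["auto arg" ++ Nat.repr n ++ " = reinterpret_cast<" ++ resolveType a t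
        ++ ">(arg" ++ Nat.repr n ++ "Ptr);\n"]
     else []) ++ listC t tl (n + 1)

def listL : List String → Nat → List String
  | [], _ => []
  | a :: tl, n =>
    (if ¬ (plainArgTypes.contains a) then ", arg" ++ Nat.repr n
     else ", " ++ a ++ " arg" ++ Nat.repr n) :: listL tl (n + 1)

theorem joinAll_foldl (l : List String) (s : String) : l.foldl (· ++ ·) s = s ++ joinAll l := by
  induction l generalizing s with
  | nil => simp [joinAll]
  | cons a tl ih =>
    rw [List.foldl_cons, ih]
    show (s ++ a) ++ joinAll tl = s ++ joinAll (a :: tl)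
    rw [show joinAll (a :: tl) = List.foldl (· ++ ·) ("" ++ a) tl from rfl, ih, String.append_assoc]
    rfl

theorem joinAll_cons (a : String) (l : List String) : joinAll (a :: l) = a ++ joinAll l := by
  rw [show joinAll (a :: l) = List.foldl (· ++ ·) ("" ++ a) l from rfl, joinAll_foldl]
  rfl

theorem loopA1 (t : String) (sig : List String) : ∀ (s : String) (n : Nat),
    sig.foldl (fun (st : String × Nat) arg =>
      let defs := st.1 ++ ","
      let arg_resolved := arg
      let arg_resolved :=
        if arg == "gentype" then t
        else if arg == "gentype *" then t ++ " *"
        else PySem.Str.replace arg_resolved "<gentype>" ("<" ++ t ++ ">")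
      let defs :=
        if ¬ (plainArgTypes.contains arg_resolved) then
          defs ++ " void *arg" ++ Nat.repr st.2 ++ "Ptr"
        else
          defs ++ " " ++ arg_resolved ++ " arg" ++ Nat.repr st.2
      (defs, st.2 + 1)) (s, n)
    = (s ++ joinAll (listP t sig n), n + sig.length) := by
  induction sig with
  | nil => intro s n; simp [listP, joinAll]
  | cons a tl ih =>
    intro s n
    rw [List.foldl_cons]
    show List.foldl _ (_, n + 1) tl = _
    rw [ih]
    rw [listP, joinAll_cons]
    simp only [pieceP, resolveType, Prod.mk.injEq]
    refine ⟨?_, by simp [List.length_cons]; omega⟩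
    (repeat' split) <;> (simp only [String.append_assoc]; rfl)

theorem joinAll_nil : joinAll [] = "" := rfl

theorem joinAll_singleton (x : String) : joinAll [x] = x := by
  rw [joinAll_cons, joinAll_nil, String.append_empty]

theorem joinAll_append (l1 l2 : List String) : joinAll (l1 ++ l2) = joinAll l1 ++ joinAll l2 := by
  induction l1 with
  | nil => rfl
  | cons a tl ih => rw [List.cons_append, joinAll_cons, joinAll_cons, ih, String.append_assoc]

theorem loopA2 (t : String) (sig : List String) : ∀ (s : String) (n : Nat),
    sig.foldl (fun (st : String × Nat) arg =>
      let arg_resolved := arg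
      let arg_resolved :=
        if arg == "gentype" then t
        else if arg == "gentype *" then t ++ " *"
        else PySem.Str.replace arg_resolved "<gentype>" ("<" ++ t ++ ">")
      let defs :=
        if ¬ (plainArgTypes.contains arg_resolved) then
          st.1 ++ "auto arg" ++ Nat.repr st.2 ++ " = reinterpret_cast<" ++ arg_resolved
            ++ ">(arg" ++ Nat.repr st.2 ++ "Ptr);\n"
        else st.1
      (defs, st.2 + 1)) (s, n)
    = (s ++ joinAll (listC t sig n), n + sig.length) := by
  induction sig with
  | nil => intro s n; simp [listC, joinAll]
  | cons a tl ih =>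
    intro s n
    rw [List.foldl_cons]
    show List.foldl _ (_, n + 1) tl = _
    rw [ih]
    rw [listC, joinAll_append]
    simp only [resolveType, Prod.mk.injEq]
    refine ⟨?_, by simp [List.length_cons]; omega⟩
    (repeat' split) <;>
      (simp only [joinAll_singleton, joinAll_nil, String.empty_append, String.append_assoc]; try rfl)

theorem loopA3 (sig : List String) : ∀ (s : String) (n : Nat),
    sig.foldl (fun (st : String × Nat) arg =>
      let defs := st.1 ++ ", "
      let defs :=
        if ¬ (plainArgTypes.contains arg) then defs ++ "arg" ++ Nat.repr st.2
        else defs ++ "" ++ arg ++ " arg" ++ Nat.repr st.2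
      (defs, st.2 + 1)) (s, n)
    = (s ++ joinAll (listL sig n), n + sig.length) := by
  induction sig with
  | nil => intro s n; simp [listL, joinAll]
  | cons a tl ih =>
    intro s n
    rw [List.foldl_cons]
    show List.foldl _ (_, n + 1) tl = _
    rw [ih]
    rw [listL, joinAll_cons]
    simp only [Prod.mk.injEq]
    refine ⟨?_, by simp [List.length_cons]; omega⟩
    (repeat' split) <;> (simp only [String.append_assoc]; rfl)

theorem loopB (t : String) (sig : List String) :
    ∀ (ps cs ls : List String) (n : Nat),
    sig.foldl (fun (acc : List String × List String × List String × Nat) arg =>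
      let (params, casts, call_args, i) := acc
      let r := resolveType arg t
      let params :=
        if ¬ (plainArgTypes.contains r) then params ++ [", void *arg" ++ Nat.repr i ++ "Ptr"]
        else params ++ [", " ++ r ++ " arg" ++ Nat.repr i]
      let casts :=
        if ¬ (plainArgTypes.contains r) then
          casts ++ ["auto arg" ++ Nat.repr i ++ " = reinterpret_cast<" ++ r
            ++ ">(arg" ++ Nat.repr i ++ "Ptr);\n"]
        else casts
      let call_args :=
        if ¬ (plainArgTypes.contains arg) then call_args ++ [", arg" ++ Nat.repr i]
        else call_args ++ [", " ++ arg ++ " arg" ++ Nat.repr i]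
      (params, casts, call_args, i + 1)) (ps, cs, ls, n)
    = (ps ++ listP t sig n, cs ++ listC t sig n, ls ++ listL sig n, n + sig.length) := by
  induction sig with
  | nil => intro ps cs ls n; simp [listP, listC, listL]
  | cons a tl ih =>
    intro ps cs ls n
    rw [List.foldl_cons]
    show List.foldl _ (_, _, _, n + 1) tl = _
    rw [ih]
    rw [listP, listC, listL]
    simp only [pieceP, Prod.mk.injEq]
    refine ⟨?_, ?_, ?_, by simp [List.length_cons]; omega⟩ <;>
      (repeat' split) <;> simp [List.append_assoc]

theorem chunk_eq (name t : String) (sig : List String) (s : String) :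
    (
      let defs := s ++ "void " ++ get_mangled_name name t ++ "("
        ++ "void *devicePtr, " ++ "void *allocatorPtr"
      let st := sig.foldl (fun (st : String × Nat) arg =>
          let defs := st.1 ++ ","
          let arg_resolved := arg
          let arg_resolved :=
            if arg == "gentype" then t
            else if arg == "gentype *" then t ++ " *"
            else PySem.Str.replace arg_resolved "<gentype>" ("<" ++ t ++ ">")
          let defs :=
            if ¬ (plainArgTypes.contains arg_resolved) then
              defs ++ " void *arg" ++ Nat.repr st.2 ++ "Ptr"
            else
              defs ++ " " ++ arg_resolved ++ " arg" ++ Nat.repr st.2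
          (defs, st.2 + 1)) (defs, 0)
      let defs := st.1 ++ ") {\n"
        ++ "auto device = reinterpret_cast<Device*>(devicePtr);\n"
        ++ "auto allocator = reinterpret_cast<Allocator*>(allocatorPtr);\n"
      let st := sig.foldl (fun (st : String × Nat) arg =>
          let arg_resolved := arg
          let arg_resolved :=
            if arg == "gentype" then t
            else if arg == "gentype *" then t ++ " *"
            else PySem.Str.replace arg_resolved "<gentype>" ("<" ++ t ++ ">")
          let defs :=
            if ¬ (plainArgTypes.contains arg_resolved) then
              st.1 ++ "auto arg" ++ Nat.repr st.2 ++ " = reinterpret_cast<" ++ arg_resolved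
                ++ ">(arg" ++ Nat.repr st.2 ++ "Ptr);\n"
            else st.1
          (defs, st.2 + 1)) (defs, 0)
      let defs := st.1 ++ name ++ "<" ++ t ++ ">(device, allocator"
      let st := sig.foldl (fun (st : String × Nat) arg =>
          let defs := st.1 ++ ", "
          let defs :=
            if ¬ (plainArgTypes.contains arg) then defs ++ "arg" ++ Nat.repr st.2
            else defs ++ "" ++ arg ++ " arg" ++ Nat.repr st.2
          (defs, st.2 + 1)) (defs, 0)
      st.1 ++ ");\n" ++ "}\n")
    = s ++ (
        let acc := sig.foldl
          (fun (acc : List String × List String × List String × Nat) arg =>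
            let (params, casts, call_args, i) := acc
            let r := resolveType arg t
            let params :=
              if ¬ (plainArgTypes.contains r) then params ++ [", void *arg" ++ Nat.repr i ++ "Ptr"]
              else params ++ [", " ++ r ++ " arg" ++ Nat.repr i]
            let casts :=
              if ¬ (plainArgTypes.contains r) then
                casts ++ ["auto arg" ++ Nat.repr i ++ " = reinterpret_cast<" ++ r
                  ++ ">(arg" ++ Nat.repr i ++ "Ptr);\n"]
              else casts
            let call_args :=
              if ¬ (plainArgTypes.contains arg) then call_args ++ [", arg" ++ Nat.repr i]
              else call_args ++ [", " ++ arg ++ " arg" ++ Nat.repr i]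
            (params, casts, call_args, i + 1)) ([], [], [], 0)
        "void athn_" ++ name ++ "_"
          ++ (match PySem.Str.pyGet? t 0 with | some c => String.ofList [c] | none => "")
          ++ "(void *devicePtr, void *allocatorPtr" ++ joinAll acc.1 ++ ") {\n"
          ++ "auto device = reinterpret_cast<Device*>(devicePtr);\n"
          ++ "auto allocator = reinterpret_cast<Allocator*>(allocatorPtr);\n"
          ++ joinAll acc.2.1
          ++ name ++ "<" ++ t ++ ">(device, allocator" ++ joinAll acc.2.2.1 ++ ");\n"
          ++ "}\n") := by
  dsimp only
  rw [loopA1, loopA2, loopA3, loopB]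
  simp only [get_mangled_name, List.nil_append, String.append_assoc]
  rfl

theorem mainFold (name : String) (sig : List String) : ∀ (gts : List String) (s : String),
    gts.foldl (fun (defs : String) (template : String) =>
      let defs := defs ++ "void " ++ get_mangled_name name template ++ "("
        ++ "void *devicePtr, " ++ "void *allocatorPtr"
      let st := sig.foldl (fun (st : String × Nat) arg =>
          let defs := st.1 ++ ","
          let arg_resolved := arg
          let arg_resolved :=
            if arg == "gentype" then template
            else if arg == "gentype *" then template ++ " *"
            else PySem.Str.replace arg_resolved "<gentype>" ("<" ++ template ++ ">")
          let defs :=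
            if ¬ (plainArgTypes.contains arg_resolved) then
              defs ++ " void *arg" ++ Nat.repr st.2 ++ "Ptr"
            else
              defs ++ " " ++ arg_resolved ++ " arg" ++ Nat.repr st.2
          (defs, st.2 + 1)) (defs, 0)
      let defs := st.1 ++ ") {\n"
        ++ "auto device = reinterpret_cast<Device*>(devicePtr);\n"
        ++ "auto allocator = reinterpret_cast<Allocator*>(allocatorPtr);\n"
      let st := sig.foldl (fun (st : String × Nat) arg =>
          let arg_resolved := arg
          let arg_resolved :=
            if arg == "gentype" then template
            else if arg == "gentype *" then template ++ " *"
            else PySem.Str.replace arg_resolved "<gentype>" ("<" ++ template ++ ">")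
          let defs :=
            if ¬ (plainArgTypes.contains arg_resolved) then
              st.1 ++ "auto arg" ++ Nat.repr st.2 ++ " = reinterpret_cast<" ++ arg_resolved
                ++ ">(arg" ++ Nat.repr st.2 ++ "Ptr);\n"
            else st.1
          (defs, st.2 + 1)) (defs, 0)
      let defs := st.1 ++ name ++ "<" ++ template ++ ">(device, allocator"
      let st := sig.foldl (fun (st : String × Nat) arg =>
          let defs := st.1 ++ ", "
          let defs :=
            if ¬ (plainArgTypes.contains arg) then defs ++ "arg" ++ Nat.repr st.2
            else defs ++ "" ++ arg ++ " arg" ++ Nat.repr st.2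
          (defs, st.2 + 1)) (defs, 0)
      st.1 ++ ");\n" ++ "}\n")
 s
    = s ++ joinAll (gts.map (fun template =>
        let acc := sig.foldl
          (fun (acc : List String × List String × List String × Nat) arg =>
            let (params, casts, call_args, i) := acc
            let r := resolveType arg template
            let params :=
              if ¬ (plainArgTypes.contains r) then params ++ [", void *arg" ++ Nat.repr i ++ "Ptr"]
              else params ++ [", " ++ r ++ " arg" ++ Nat.repr i]
            let casts :=
              if ¬ (plainArgTypes.contains r) then
                casts ++ ["auto arg" ++ Nat.repr i ++ " = reinterpret_cast<" ++ r
                  ++ ">(arg" ++ Nat.repr i ++ "Ptr);\n"]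
              else casts
            let call_args :=
              if ¬ (plainArgTypes.contains arg) then call_args ++ [", arg" ++ Nat.repr i]
              else call_args ++ [", " ++ arg ++ " arg" ++ Nat.repr i]
            (params, casts, call_args, i + 1)) ([], [], [], 0)
        "void athn_" ++ name ++ "_"
          ++ (match PySem.Str.pyGet? template 0 with | some c => String.ofList [c] | none => "")
          ++ "(void *devicePtr, void *allocatorPtr" ++ joinAll acc.1 ++ ") {\n"
          ++ "auto device = reinterpret_cast<Device*>(devicePtr);\n"
          ++ "auto allocator = reinterpret_cast<Allocator*>(allocatorPtr);\n"
          ++ joinAll acc.2.1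
          ++ name ++ "<" ++ template ++ ">(device, allocator" ++ joinAll acc.2.2.1 ++ ");\n"
          ++ "}\n")) := by
  intro gts
  induction gts with
  | nil => intro s; rw [List.foldl_nil, List.map_nil, joinAll_nil, String.append_empty]
  | cons t tl ih =>
    intro s
    rw [List.foldl_cons, ih, List.map_cons, joinAll_cons, chunk_eq name t sig s, String.append_assoc]

-- ===== VERDICT (by name: the statement is the Claim_ definition above) =====
theorem generate_wrapper_spec : Claim_equal_generate_wrapper := by
  intro name sig gts _ _
  unfold Spec_generate_wrapper
  have h := mainFold name sig gts ""
  rw [String.empty_append] at h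
  exact h
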